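-- pv_equiv track=rewrite | github.com/yunhuijang/GEEL | data/data_utils.py | seq_to_adj_list
-- ===== SOURCE A (Python) =====
-- def seq_to_adj_list(seq):
--     adj_list = []
--     cur_node_num = 0
--     for element in seq:
--         if element != 0:
--             adj_list.append((cur_node_num, cur_node_num-element))
--         else:
--             cur_node_num += 1
--             continue
--     return adj_list
-- ===== SOURCE B (Python) =====
-- def seq_to_adj_list(seq):
--     # index-first: for each position, the number of zeros strictly before it,
--     # then a single filter-and-map comprehension over (node_index, element) pairs
--     zeros_before = [0] * len(seq)
--     c = 0
--     for i, e in enumerate(seq):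
--         zeros_before[i] = c
--         if e == 0:
--             c += 1
--     return [(n, n - e) for n, e in zip(zeros_before, seq) if e != 0]
-- ===== Notes on version B (the rewrite author's own statement) =====
-- stated objective: alternative
-- what changed: Replaces the single stateful accumulator loop (emitting edges while counting zeros) with an index-first decomposition: a pass computing each position's exclusive zeros-before node index, then one filter-and-map comprehension over (index, element) pairs.
import Mathlib
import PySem

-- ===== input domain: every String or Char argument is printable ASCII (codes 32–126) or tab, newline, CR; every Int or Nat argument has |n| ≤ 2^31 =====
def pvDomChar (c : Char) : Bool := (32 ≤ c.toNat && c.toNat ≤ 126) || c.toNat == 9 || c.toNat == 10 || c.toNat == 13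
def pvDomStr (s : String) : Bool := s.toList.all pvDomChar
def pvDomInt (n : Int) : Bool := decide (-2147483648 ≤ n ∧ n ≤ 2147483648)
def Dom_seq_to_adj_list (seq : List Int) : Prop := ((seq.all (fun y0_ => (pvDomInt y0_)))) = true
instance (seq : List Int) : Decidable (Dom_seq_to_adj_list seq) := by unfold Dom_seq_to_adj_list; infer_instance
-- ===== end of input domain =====

-- B computes edges by an index-first decomposition (exclusive zeros-before prefix, then filter-and-map) instead of A's stateful accumulator loop; same cost, alternative structure.
-- ===== PORT A =====
def seq_to_adj_list (seq : List Int) : List (Int × Int) :=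
  (seq.foldl (fun (st : List (Int × Int) × Int) element =>
      if element ≠ 0 then (st.1 ++ [(st.2, st.2 - element)], st.2)
      else (st.1, st.2 + 1)) ([], 0)).1

-- ===== PORT B =====
-- the zeros_before array built by Source B's loop (list of exclusive zero-counts)
def zerosBefore (seq : List Int) : List Int :=
  (seq.foldl (fun (st : List Int × Int) e =>
      (st.1 ++ [st.2], if e == 0 then st.2 + 1 else st.2)) ([], 0)).1

def seq_to_adj_list_alt (seq : List Int) : List (Int × Int) :=
  ((zerosBefore seq).zip seq).filterMap
    (fun p => if p.2 ≠ 0 then some (p.1, p.1 - p.2) else none)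

-- ===== PRECONDITION & SPEC =====
def Spec_seq_to_adj_list (seq : List Int) (out : List (Int × Int)) : Prop := out = seq_to_adj_list_alt seq
instance (seq : List Int) (out : List (Int × Int)) : Decidable (Spec_seq_to_adj_list seq out) := by unfold Spec_seq_to_adj_list; infer_instance

-- ===== CLAIM (what is proved, stated in full; the proofs are below) =====
def Claim_equal_seq_to_adj_list : Prop := ∀ (seq : List Int), Dom_seq_to_adj_list seq → Spec_seq_to_adj_list seq (seq_to_adj_list seq)

-- ===== LEMMAS AND PROOFS =====
-- reference recursion: edges emitted starting from node counter c
def edgesFrom (c : Int) : List Int → List (Int × Int)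
  | [] => []
  | e :: t => if e ≠ 0 then (c, c - e) :: edgesFrom c t else edgesFrom (c + 1) t

-- reference recursion for the exclusive zeros-before list starting at c
def zbFrom (c : Int) : List Int → List Int
  | [] => []
  | e :: t => c :: zbFrom (if e == 0 then c + 1 else c) t

theorem foldA_general (seq : List Int) (acc : List (Int × Int)) (c : Int) :
    (seq.foldl (fun (st : List (Int × Int) × Int) element =>
      if element ≠ 0 then (st.1 ++ [(st.2, st.2 - element)], st.2)
      else (st.1, st.2 + 1)) (acc, c)).1 = acc ++ edgesFrom c seq := by
  induction seq generalizing acc c with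
  | nil => simp [edgesFrom]
  | cons e t ih =>
      by_cases h : e = 0 <;>
        simp only [List.foldl_cons, edgesFrom, h, ne_eq, not_true_eq_false,
          not_false_eq_true, if_true, if_false, ite_true, ite_false] <;>
        rw [ih] <;> simp

theorem foldB_general (seq : List Int) (acc : List Int) (c : Int) :
    (seq.foldl (fun (st : List Int × Int) e =>
      (st.1 ++ [st.2], if e == 0 then st.2 + 1 else st.2)) (acc, c)).1
      = acc ++ zbFrom c seq := by
  induction seq generalizing acc c with
  | nil => simp [zbFrom]
  | cons e t ih =>
      by_cases h : e = 0 <;>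
        simp only [List.foldl_cons, zbFrom, h, beq_self_eq_true, if_true, ite_true] <;>
        rw [ih] <;> simp [h]

theorem zip_zb_filterMap (seq : List Int) (c : Int) :
    ((zbFrom c seq).zip seq).filterMap
      (fun p => if p.2 ≠ 0 then some (p.1, p.1 - p.2) else none)
      = edgesFrom c seq := by
  induction seq generalizing c with
  | nil => simp [zbFrom, edgesFrom]
  | cons e t ih =>
      by_cases h : e = 0
      · simpa [zbFrom, edgesFrom, h] using ih (c + 1)
      · simpa [zbFrom, edgesFrom, h] using ih c


-- ===== VERDICT (by name: the statement is the Claim_ definition above) =====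
theorem seq_to_adj_list_spec : Claim_equal_seq_to_adj_list := by
  intro seq _
  unfold Spec_seq_to_adj_list seq_to_adj_list seq_to_adj_list_alt zerosBefore
  rw [foldA_general, foldB_general]
  simpa using (zip_zb_filterMap seq 0).symm
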